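-- pv_equiv track=rewrite | github.com/dgmiller/rattlesnake | practice/hack1.py | go_until
-- ===== SOURCE A (Python) =====
-- def go_until(seq):
--     L = []
--     count = 0
--     i = 0
--     while i < len(seq):
--         while seq[i] >= 0:
--             count += seq[i]
--             i += 1
--             if i >= len(seq):
--                 break
--         L.append(count)
--         count = 0
--         if i >= len(seq):
--             break
--         while seq[i] < 0:
--             count += seq[i]
--             i += 1
--             if i >= len(seq):
--                 break
--         L.append(count)
--         count = 0
--     return L
-- ===== SOURCE B (Python) =====
-- def go_until(seq):
--     # Back-to-front run merging: walk the sequence in reverse, merging each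
--     # element into the most recent run of the same sign class, then prepend
--     # a zero non-negative run if the sequence starts negative.
--     rev = []  # runs in reverse order; each entry is [is_nonneg, total]
--     for x in reversed(seq):
--         nn = x >= 0
--         if rev and rev[-1][0] == nn:
--             rev[-1][1] += x
--         else:
--             rev.append([nn, x])
--     if rev and not rev[-1][0]:
--         rev.append([True, 0])
--     return [total for _, total in reversed(rev)]
-- ===== Notes on version B (the rewrite author's own statement) =====
-- stated objective: alternative
-- what changed: Replaced A's forward index cursor with three nested while loops alternating forced non-negative/negative phases by a single back-to-front pass that merges each element into the most recent run of its sign class, prepending a zero run once at the end when the sequence starts negative.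
import Mathlib
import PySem

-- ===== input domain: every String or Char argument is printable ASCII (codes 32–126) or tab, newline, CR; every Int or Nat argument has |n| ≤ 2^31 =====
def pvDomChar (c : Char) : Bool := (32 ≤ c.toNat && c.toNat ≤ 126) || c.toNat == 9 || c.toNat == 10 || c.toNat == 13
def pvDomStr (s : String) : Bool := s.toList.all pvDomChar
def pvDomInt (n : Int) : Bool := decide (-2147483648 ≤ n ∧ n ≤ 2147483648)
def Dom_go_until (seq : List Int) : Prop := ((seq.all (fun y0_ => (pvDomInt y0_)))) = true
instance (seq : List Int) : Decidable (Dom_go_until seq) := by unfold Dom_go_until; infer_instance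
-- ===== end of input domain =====

-- B rebuilds the run sums back-to-front by merging each element into the most
-- recent run of its sign class (objective: alternative decomposition, same cost).

-- ===== PORT A =====
-- inner `while seq[i] >= 0` loop: accumulate into count while the head is ≥ 0
def sumNonneg : List Int → Int → Int × List Int
  | [], c => (c, [])
  | x :: xs, c => if x ≥ 0 then sumNonneg xs (c + x) else (c, x :: xs)

-- inner `while seq[i] < 0` loop
def sumNeg : List Int → Int → Int × List Int
  | [], c => (c, [])
  | x :: xs, c => if x < 0 then sumNeg xs (c + x) else (c, x :: xs)

theorem sumNonneg_len : ∀ (l : List Int) (c : Int), (sumNonneg l c).2.length ≤ l.length := by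
  intro l; induction l with
  | nil => intro c; simp [sumNonneg]
  | cons x xs ih =>
    intro c; simp only [sumNonneg]; split
    · exact Nat.le_trans (ih _) (Nat.le_succ _)
    · simp

theorem sumNeg_len : ∀ (l : List Int) (c : Int), (sumNeg l c).2.length ≤ l.length := by
  intro l; induction l with
  | nil => intro c; simp [sumNeg]
  | cons x xs ih =>
    intro c; simp only [sumNeg]; split
    · exact Nat.le_trans (ih _) (Nat.le_succ _)
    · simp

-- the outer `while i < len(seq)` loop of A, over the unread suffix
def loopA (seq : List Int) : List Int :=
  match seq with
  | [] => []
  | x :: xs =>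
    (sumNonneg (x :: xs) 0).1 ::
      (match h : (sumNonneg (x :: xs) 0).2 with
       | [] => []
       | y :: ys => (sumNeg (y :: ys) 0).1 :: loopA (sumNeg (y :: ys) 0).2)
termination_by seq.length
decreasing_by
  have h1 : (y :: ys).length ≤ (x :: xs).length := h ▸ sumNonneg_len (x :: xs) 0
  have h2 : (sumNeg (y :: ys) 0).2.length ≤ (y :: ys).length := sumNeg_len _ _
  -- y < 0 where sumNonneg stopped, so sumNeg consumes at least y
  have hy : y < 0 := by
    clear h1 h2
    by_contra hy
    have : ∀ (l : List Int) (c : Int), (sumNonneg l c).2 = y :: ys → y < 0 := by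
      intro l; induction l with
      | nil => intro c hc; simp [sumNonneg] at hc
      | cons a as ih =>
        intro c hc
        simp only [sumNonneg] at hc
        split at hc
        · exact ih _ hc
        · cases hc; omega
    exact hy (this _ _ h)
  have : (sumNeg (y :: ys) 0).2.length ≤ ys.length := by
    simp only [sumNeg, if_pos hy]
    exact sumNeg_len ys (0 + y)
  simp only [List.length_cons] at *
  omega

def go_until (seq : List Int) : List Int := loopA seq

-- ===== PORT B =====
-- B's reversed-order loop with merge-into-last-run is structural recursion
-- (foldr): the list head here is the most recently formed run (rev[-1]).
def mergeRuns : List Int → List (Bool × Int)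
  | [] => []
  | x :: xs =>
    let nn := decide (x ≥ 0)
    match mergeRuns xs with
    | [] => [(nn, x)]
    | (c, s) :: rest =>
      if c = nn then (nn, x + s) :: rest else (nn, x) :: (c, s) :: rest

def go_until_alt (seq : List Int) : List Int :=
  let r := mergeRuns seq
  let r' := match r with
            | (false, _) :: _ => (true, (0 : Int)) :: r
            | _ => r
  r'.map Prod.snd

-- ===== PRECONDITION & SPEC =====
def Spec_go_until (seq : List Int) (out : List Int) : Prop := out = go_until_alt seq
instance (seq : List Int) (out : List Int) : Decidable (Spec_go_until seq out) := by unfold Spec_go_until; infer_instance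

-- ===== CLAIM (what is proved, stated in full; the proofs are below) =====
def Claim_equal_go_until : Prop := ∀ (seq : List Int), Dom_go_until seq → Spec_go_until seq (go_until seq)

-- ===== LEMMAS AND PROOFS =====

-- common characterization: the alternating run sums, recursion on the sign class of the head
def runs (seq : List Int) : List Int :=
  match seq with
  | [] => []
  | x :: xs =>
    if x ≥ 0 then
      (x + (xs.takeWhile (fun y => decide (y ≥ 0))).sum)
        :: runs (xs.dropWhile (fun y => decide (y ≥ 0)))
    else
      (x + (xs.takeWhile (fun y => decide (y < 0))).sum)
        :: runs (xs.dropWhile (fun y => decide (y < 0)))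
termination_by seq.length
decreasing_by
  all_goals simp only [List.length_cons]
  all_goals exact Nat.lt_succ_of_le (List.length_dropWhile_le _ _)

theorem sumNonneg_eq : ∀ (l : List Int) (c : Int),
    sumNonneg l c = (c + (l.takeWhile (fun y => decide (y ≥ 0))).sum,
                     l.dropWhile (fun y => decide (y ≥ 0))) := by
  intro l; induction l with
  | nil => intro c; simp [sumNonneg]
  | cons x xs ih =>
    intro c
    by_cases hx : x ≥ 0
    · simp [sumNonneg, hx, ih, List.takeWhile_cons, List.dropWhile_cons, add_assoc]
    · simp [sumNonneg, hx, List.takeWhile_cons, List.dropWhile_cons]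

theorem sumNeg_eq : ∀ (l : List Int) (c : Int),
    sumNeg l c = (c + (l.takeWhile (fun y => decide (y < 0))).sum,
                  l.dropWhile (fun y => decide (y < 0))) := by
  intro l; induction l with
  | nil => intro c; simp [sumNeg]
  | cons x xs ih =>
    intro c
    by_cases hx : x < 0
    · simp [sumNeg, hx, ih, List.takeWhile_cons, List.dropWhile_cons, add_assoc]
    · simp [sumNeg, hx, List.takeWhile_cons, List.dropWhile_cons]

-- head of dropWhile fails the predicate
theorem dropWhile_head_false {p : Int → Bool} :
    ∀ (l : List Int) (y : Int) (ys : List Int), l.dropWhile p = y :: ys → p y = false := by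
  intro l; induction l with
  | nil => intro y ys h; simp at h
  | cons a as ih =>
    intro y ys h
    by_cases ha : p a
    · rw [List.dropWhile_cons_of_pos ha] at h; exact ih _ _ h
    · rw [List.dropWhile_cons_of_neg (by simp [ha])] at h
      cases h; simpa using ha

-- decoration of runs with A's forced leading non-negative sum
def runs0 (seq : List Int) : List Int :=
  match seq with
  | [] => []
  | x :: _ => if x < 0 then 0 :: runs seq else runs seq

theorem runs_cons_pos {x : Int} {xs : List Int} (hx : x ≥ 0) :
    runs (x :: xs) = (x + (xs.takeWhile (fun y => decide (y ≥ 0))).sum)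
        :: runs (xs.dropWhile (fun y => decide (y ≥ 0))) := by
  rw [runs]; simp [hx]

theorem runs_cons_neg {x : Int} {xs : List Int} (hx : ¬ x ≥ 0) :
    runs (x :: xs) = (x + (xs.takeWhile (fun y => decide (y < 0))).sum)
        :: runs (xs.dropWhile (fun y => decide (y < 0))) := by
  rw [runs]; simp [hx]

-- A's loop computes the alternating run sums (with the forced leading 0 on a negative head)
theorem loopA_eq_runs : ∀ (n : Nat) (seq : List Int), seq.length ≤ n →
    loopA seq = runs0 seq := by
  intro n
  induction n with
  | zero =>
    intro seq h
    have : seq = [] := List.eq_nil_of_length_eq_zero (Nat.le_zero.mp h)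
    subst this; simp [loopA, runs0]
  | succ n ih =>
    intro seq hlen
    match seq with
    | [] => simp [loopA, runs0]
    | x :: xs =>
      rw [loopA, sumNonneg_eq]
      simp only [runs0]
      by_cases hx : x ≥ 0
      · have hxd : decide (x ≥ 0) = true := decide_eq_true hx
        rw [runs_cons_pos hx, if_neg (by omega : ¬ x < 0)]
        simp only [List.takeWhile_cons, List.dropWhile_cons, hxd, if_true, zero_add]
        congr 1
        split
        · rename_i heq
          simp only [List.dropWhile_cons, hxd, if_true] at heq
          rw [heq]; simp [runs]
        · rename_i y ys heq
          simp only [List.dropWhile_cons, hxd, if_true] at heq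
          have hy : y < 0 := by
            have := dropWhile_head_false _ _ _ heq; simp at this; omega
          have hyd : decide (y < 0) = true := decide_eq_true hy
          rw [heq, sumNeg_eq, runs_cons_neg (by omega : ¬ y ≥ 0)]
          simp only [List.takeWhile_cons, List.dropWhile_cons, hyd, if_true, zero_add]
          congr 1
          have hlen1 : (y :: ys).length ≤ xs.length := heq ▸ List.length_dropWhile_le _ _
          have hlen2 : (ys.dropWhile (fun z => decide (z < 0))).length ≤ ys.length :=
            List.length_dropWhile_le _ _
          rw [ih (ys.dropWhile (fun z => decide (z < 0)))
                (by simp only [List.length_cons] at hlen hlen1; omega)]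
          rcases h2 : ys.dropWhile (fun z => decide (z < 0)) with _ | ⟨z, zs⟩
          · simp [runs0, runs]
          · have hz : ¬ (z < 0) := by
              have := dropWhile_head_false _ _ _ h2; simpa using this
            simp [runs0, if_neg hz]
      · have hxd : decide (x ≥ 0) = false := decide_eq_false hx
        rw [runs_cons_neg hx, if_pos (by omega : x < 0)]
        have hxd2 : decide (x < 0) = true := decide_eq_true (by omega : x < 0)
        simp only [List.takeWhile_cons, List.dropWhile_cons, hxd, if_false,
                   Bool.false_eq_true, List.sum_nil, zero_add]
        congr 1
        split
        · rename_i heq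
          simp only [List.dropWhile_cons, hxd, Bool.false_eq_true, if_false] at heq
          exact (List.cons_ne_nil _ _ heq).elim
        · rename_i y ys heq
          simp only [List.dropWhile_cons, hxd, Bool.false_eq_true, if_false] at heq
          injection heq with h1 h2
          subst h1; subst h2
          rw [sumNeg_eq]
          simp only [List.takeWhile_cons, List.dropWhile_cons, hxd2, if_true, zero_add]
          congr 1
          have hlen2 : (xs.dropWhile (fun z => decide (z < 0))).length ≤ xs.length :=
            List.length_dropWhile_le _ _
          rw [ih (xs.dropWhile (fun z => decide (z < 0)))
                (by simp only [List.length_cons] at hlen; omega)]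
          rcases h2 : xs.dropWhile (fun z => decide (z < 0)) with _ | ⟨z, zs⟩
          · simp [runs0, runs]
          · have hz : ¬ (z < 0) := by
              have := dropWhile_head_false _ _ _ h2; simpa using this
            simp [runs0, if_neg hz]

-- B's merge of x into the run list peels exactly the run of x's sign class
theorem mergeRuns_eq : ∀ (xs : List Int) (x : Int),
    mergeRuns (x :: xs) =
      if x ≥ 0 then
        (true, x + (xs.takeWhile (fun y => decide (y ≥ 0))).sum)
          :: mergeRuns (xs.dropWhile (fun y => decide (y ≥ 0)))
      else
        (false, x + (xs.takeWhile (fun y => decide (y < 0))).sum)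
          :: mergeRuns (xs.dropWhile (fun y => decide (y < 0))) := by
  intro xs
  induction xs with
  | nil => intro x; by_cases hx : x ≥ 0 <;> simp [mergeRuns, hx]
  | cons y ys ih =>
    intro x
    rw [show mergeRuns (x :: y :: ys) =
          (let nn := decide (x ≥ 0);
           match mergeRuns (y :: ys) with
           | [] => [(nn, x)]
           | (c, s) :: rest =>
             if c = nn then (nn, x + s) :: rest else (nn, x) :: (c, s) :: rest) from rfl]
    rw [ih y]
    by_cases hx : x ≥ 0 <;> by_cases hy : y ≥ 0
    · simp [hx, hy, List.takeWhile_cons, List.dropWhile_cons, add_assoc]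
    · have hy' : y < 0 := by omega
      simp [hx, hy, hy', List.takeWhile_cons, List.dropWhile_cons, mergeRuns, ih]
    · have hy' : ¬ (y < 0) := by omega
      simp [hx, hy, hy', List.takeWhile_cons, List.dropWhile_cons, mergeRuns, ih]
    · have hy' : y < 0 := by omega
      simp [hx, hy, hy', List.takeWhile_cons, List.dropWhile_cons, add_assoc]

theorem mergeRuns_map_snd : ∀ (n : Nat) (seq : List Int), seq.length ≤ n →
    (mergeRuns seq).map Prod.snd = runs seq := by
  intro n
  induction n with
  | zero =>
    intro seq h
    have : seq = [] := List.eq_nil_of_length_eq_zero (Nat.le_zero.mp h)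
    subst this; simp [mergeRuns, runs]
  | succ n ih =>
    intro seq hlen
    match seq with
    | [] => simp [mergeRuns, runs]
    | x :: xs =>
      rw [mergeRuns_eq]
      by_cases hx : x ≥ 0
      · rw [if_pos hx, runs_cons_pos hx, List.map_cons]
        rw [ih _ (by
          have := List.length_dropWhile_le (fun y => decide (y ≥ 0)) xs
          simp only [List.length_cons] at hlen; omega)]
      · rw [if_neg hx, runs_cons_neg hx, List.map_cons]
        rw [ih _ (by
          have := List.length_dropWhile_le (fun y => decide (y < 0)) xs
          simp only [List.length_cons] at hlen; omega)]

theorem alt_eq_runs : ∀ (seq : List Int), go_until_alt seq = runs0 seq := by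
  intro seq
  match seq with
  | [] => simp [go_until_alt, mergeRuns, runs0]
  | x :: xs =>
    unfold go_until_alt
    rw [mergeRuns_eq]
    simp only [runs0]
    by_cases hx : x ≥ 0
    · have hx' : ¬ (x < 0) := by omega
      simp only [if_pos hx, if_neg hx']
      have := mergeRuns_map_snd (x :: xs).length (x :: xs) le_rfl
      rw [mergeRuns_eq, if_pos hx] at this
      simpa using this
    · have hx' : x < 0 := by omega
      simp only [if_neg hx, if_pos hx']
      have := mergeRuns_map_snd (x :: xs).length (x :: xs) le_rfl
      rw [mergeRuns_eq, if_neg hx] at this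
      simp only [List.map_cons]
      simpa using this

-- ===== VERDICT (by name: the statement is the Claim_ definition above) =====
theorem go_until_spec : Claim_equal_go_until := by
  intro seq _
  unfold Spec_go_until go_until
  rw [alt_eq_runs, loopA_eq_runs seq.length seq le_rfl]
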